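-- pv_equiv track=rewrite | github.com/taehyuklee/Algorithm | Codility/MissingInteger.py | solution
-- ===== SOURCE A (Python) =====
-- def solution(A):
--     # Implement your solution here
--
--     a_list = list(set(A))
--     sorted_list = sorted(a_list)
--     last_element = 0
--     idx_element = sorted_list[0]
--
--     # O(N)
--     for element in sorted_list:
--
--         if idx_element != element and idx_element>0:
--             return idx_element
--
--         idx_element+=1
--
--         last_element = idx_element
--
--     if last_element<=0:
--         return 1
--     else:
--         return last_element
-- ===== SOURCE B (Python) =====
-- def solution(A):
--     present = set(A)
--     x = min(A)
--     while x in present: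
--         x += 1
--     return x if x > 0 else 1
-- ===== Notes on version B (the rewrite author's own statement) =====
-- stated objective: faster
-- what changed: Replaces A's dedup+sort+linear scan (with its last_element bookkeeping) by a hash-set membership walk: start at min(A), advance while the integer is present, clamp the first absent integer to at least 1.
-- outside the precondition, e.g. on solution([]): A raises IndexError, B raises ValueError
import Mathlib
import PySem

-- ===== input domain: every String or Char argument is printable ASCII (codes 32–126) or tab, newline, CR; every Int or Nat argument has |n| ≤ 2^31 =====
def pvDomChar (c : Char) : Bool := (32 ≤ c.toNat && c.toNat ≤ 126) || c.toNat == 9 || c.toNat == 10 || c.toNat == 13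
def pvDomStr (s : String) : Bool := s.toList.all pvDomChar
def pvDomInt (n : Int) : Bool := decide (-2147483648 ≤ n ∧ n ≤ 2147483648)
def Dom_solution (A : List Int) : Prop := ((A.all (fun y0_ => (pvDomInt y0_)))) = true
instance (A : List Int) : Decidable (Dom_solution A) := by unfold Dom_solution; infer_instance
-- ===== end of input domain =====

-- B replaces A's dedup+sort+scan with a hash-set membership walk from min(A); asymptotically faster.

-- ===== PORT A =====
-- the for-loop of A: state = (idx_element, last_element)
def solLoop : List Int → Int → Int → Int
  | [], _idx, last => if last ≤ 0 then 1 else last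
  | e :: rest, idx, _last => if idx ≠ e ∧ idx > 0 then idx else solLoop rest (idx + 1) (idx + 1)

def solution (A : List Int) : Int :=
  let aList : PySem.Set Int := PySem.Set.ofList A
  let sortedList := PySem.List.sorted aList (fun x => x) false
  -- sorted_list[0]: Python raises IndexError on empty A (excluded by Pre_); .getD 0 is a dummy there
  let idxElement := (PySem.List.pyGet? sortedList 0).getD 0
  solLoop sortedList idxElement 0

-- ===== PORT B =====
-- the while-loop of B; the fuel (one more than the set's size) is a termination artifact: the walk
-- consumes one distinct member of the set per step, so the fuel never runs out before the gap
def walkB : Nat → PySem.Set Int → Int → Int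
  | 0, _, x => x
  | fuel + 1, s, x => if PySem.Set.contains s x then walkB fuel s (x + 1) else x

def solution_alt (A : List Int) : Int :=
  let present : PySem.Set Int := PySem.Set.ofList A
  let x := walkB (present.length + 1) present ((PySem.List.min? A (fun y => y)).getD 0)
  if x > 0 then x else 1

-- ===== PRECONDITION & SPEC =====
-- A raises IndexError on the empty list (sorted_list[0]); B raises ValueError (min of empty) there too.
def Pre_solution (A : List Int) : Prop := A ≠ []
instance (A : List Int) : Decidable (Pre_solution A) := by unfold Pre_solution; infer_instance
def pvWitness_solution : List Int := ([-2, 1, 2, 5])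

def Spec_solution (A : List Int) (out : Int) : Prop := out = solution_alt A
instance (A : List Int) (out : Int) : Decidable (Spec_solution A out) := by unfold Spec_solution; infer_instance

-- ===== CLAIM (what is proved, stated in full; the proofs are below) =====
def Claim_equal_solution : Prop := ∀ (A : List Int), Dom_solution A → Pre_solution A → Spec_solution A (solution A)

-- ===== LEMMAS AND PROOFS =====

-- walkB only queries membership, so lists with the same members give the same walk
lemma walkB_congr (fuel : Nat) (s t : List Int) (x : Int)
    (h : ∀ y : Int, y ∈ s ↔ y ∈ t) : walkB fuel s x = walkB fuel t x := by
  induction fuel generalizing x with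
  | zero => rfl
  | succ n ih =>
      simp only [walkB, PySem.Set.contains_eq_listContains]
      by_cases hx : x ∈ s
      · have hxt : x ∈ t := (h x).mp hx
        simp [hx, hxt, ih]
      · have hxt : x ∉ t := fun hxt => hx ((h x).mpr hxt)
        simp [hx, hxt]

-- an element below every queried point does not affect the walk
lemma walkB_cons_lt (fuel : Nat) (e : Int) (s : List Int) (x : Int) (h : e < x) :
    walkB fuel (e :: s) x = walkB fuel s x := by
  induction fuel generalizing x with
  | zero => rfl
  | succ n ih =>
      simp only [walkB, PySem.Set.contains_eq_listContains]
      have hne : x ≠ e := by omega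
      by_cases hx : x ∈ s
      · simp [hx, hne, ih (x + 1) (by omega)]
      · simp [hx, hne]

-- once A's cursor has fallen strictly below all remaining elements while ≤ 1, the loop ends in 1
lemma solLoop_stuck (s : List Int) (idx : Int) (hs : s.Pairwise (· < ·))
    (h1 : idx ≤ 1) (h2 : ∀ y ∈ s, idx < y) :
    solLoop s idx idx = 1 := by
  induction s generalizing idx with
  | nil => simp only [solLoop]; split <;> omega
  | cons e rest ih =>
      have he : idx < e := h2 e (List.mem_cons_self ..)
      have hrest : ∀ y ∈ rest, e < y := fun y hy => (List.pairwise_cons.mp hs).1 y hy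
      simp only [solLoop]
      by_cases hp : idx > 0
      · rw [if_pos ⟨by omega, hp⟩]; omega
      · rw [if_neg (by tauto)]
        exact ih (idx + 1) (List.pairwise_cons.mp hs).2 (by omega)
          (fun y hy => by have := hrest y hy; omega)

-- main invariant: on a strictly increasing list whose elements all lie at or above the cursor,
-- A's loop computes the (≥ 1)-clamped first integer that B's walk finds absent
lemma solLoop_eq_walk (s : List Int) (idx : Int) (fuel : Nat)
    (hs : s.Pairwise (· < ·)) (hge : ∀ y ∈ s, idx ≤ y) (hf : s.length < fuel) :
    solLoop s idx idx = (if walkB fuel s idx > 0 then walkB fuel s idx else 1) := by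
  induction s generalizing idx fuel with
  | nil =>
      obtain ⟨n, rfl⟩ : ∃ n, fuel = n + 1 := ⟨fuel - 1, by omega⟩
      have hw : walkB (n + 1) ([] : List Int) idx = idx := by
        simp [walkB, PySem.Set.contains_eq_listContains]
      rw [hw]
      simp only [solLoop]
      split <;> split <;> omega
  | cons e rest ih =>
      obtain ⟨n, rfl⟩ : ∃ n, fuel = n + 1 := ⟨fuel - 1, by omega⟩
      have hrest : ∀ y ∈ rest, e < y := fun y hy => (List.pairwise_cons.mp hs).1 y hy
      by_cases heq : idx = e
      · subst heq
        have hw : walkB (n + 1) (idx :: rest) idx = walkB n rest (idx + 1) := by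
          have hc : PySem.Set.contains (idx :: rest) idx = true := by
            simp [PySem.Set.contains_eq_listContains]
          simp only [walkB, hc, if_true]
          exact walkB_cons_lt n idx rest (idx + 1) (by omega)
        rw [hw]
        simp only [solLoop]
        rw [if_neg (by simp)]
        exact ih (idx + 1) n (List.pairwise_cons.mp hs).2
          (fun y hy => by have := hrest y hy; omega)
          (by simp only [List.length_cons] at hf; omega)
      · have hlt : idx < e := lt_of_le_of_ne (hge e (List.mem_cons_self ..)) heq
        have hnot : idx ∉ e :: rest := by
          intro hm
          rcases List.mem_cons.mp hm with h | h
          · omega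
          · have := hrest idx h; omega
        have hwalk : walkB (n + 1) (e :: rest) idx = idx := by
          simp [walkB, PySem.Set.contains_eq_listContains, hnot]
        rw [hwalk]
        by_cases hp : idx > 0
        · simp only [solLoop]
          rw [if_pos ⟨heq, hp⟩, if_pos hp]
        · simp only [solLoop]
          rw [if_neg (by tauto), if_neg hp]
          exact solLoop_stuck rest (idx + 1) (List.pairwise_cons.mp hs).2 (by omega)
            (fun y hy => by have := hrest y hy; omega)

theorem solution_eq_alt (A : List Int) (hA : A ≠ []) : solution A = solution_alt A := by
  show solLoop (PySem.List.sorted (PySem.Set.ofList A) (fun x => x) false)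
        ((PySem.List.pyGet? (PySem.List.sorted (PySem.Set.ofList A) (fun x => x) false) 0).getD 0) 0
      = (if walkB ((PySem.Set.ofList A).length + 1) (PySem.Set.ofList A)
            ((PySem.List.min? A (fun y => y)).getD 0) > 0
         then walkB ((PySem.Set.ofList A).length + 1) (PySem.Set.ofList A)
            ((PySem.List.min? A (fun y => y)).getD 0)
         else 1)
  have hof : PySem.Set.ofList A ≠ [] := by
    intro h
    cases A with
    | nil => exact hA rfl
    | cons a t =>
        have : a ∈ PySem.Set.ofList (a :: t) :=
          (PySem.Set.mem_ofList _ _).mpr (List.mem_cons_self ..)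
        simp [h] at this
  set s := PySem.List.sorted (PySem.Set.ofList A) (fun x => x) false with hsdef
  have hsne : s ≠ [] := by
    intro h
    exact hof ((PySem.List.sorted_eq_nil_iff _ _ _).mp h)
  obtain ⟨m, t, hmt⟩ := List.exists_cons_of_ne_nil hsne
  have hperm : s.Perm (PySem.Set.ofList A) := PySem.List.sorted_perm ..
  have hmemA : ∀ y : Int, y ∈ s ↔ y ∈ A := by
    intro y
    rw [hperm.mem_iff, PySem.Set.mem_ofList]
  have hpair : s.Pairwise (· < ·) := PySem.List.sorted_ofList_pairwise_lt ..
  have hmin : ∀ y ∈ A, m ≤ y := by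
    intro y hy
    exact PySem.List.key_head_sorted_le (PySem.Set.ofList A) (fun x => x)
      (hsdef.symm.trans hmt) y ((PySem.Set.mem_ofList _ _).mpr hy)
  -- min(A) is the head of the sorted dedup
  have hminA : (PySem.List.min? A (fun y => y)).getD 0 = m := by
    cases hm? : PySem.List.min? A (fun y => y) with
    | none => exact absurd ((PySem.List.min?_eq_none_iff _ _).mp hm?) hA
    | some mn =>
        have h1 : mn ∈ A := PySem.List.min?_mem hm?
        have h2 : ∀ y ∈ A, mn ≤ y := PySem.List.min?_isMin hm?
        have h3 : m ∈ A := (hmemA m).mp (by rw [hmt]; exact List.mem_cons_self ..)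
        simp only [Option.getD_some]
        exact le_antisymm (h2 m h3) (hmin mn h1)
  have hget : (PySem.List.pyGet? s 0).getD 0 = m := by
    rw [hmt, PySem.List.pyGet?_zero_cons, Option.getD_some]
  have hlen : (PySem.Set.ofList A).length = s.length := hperm.length_eq.symm
  rw [hget, hminA, hlen]
  rw [walkB_congr (s.length + 1) (PySem.Set.ofList A) s m
    (fun y => ((hmemA y).trans ((PySem.Set.mem_ofList A y)).symm).symm)]
  have hge : ∀ y ∈ s, m ≤ y := fun y hy => hmin y ((hmemA y).mp hy)
  rw [hmt] at hpair hge ⊢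
  rw [show solLoop (m :: t) m 0 = solLoop (m :: t) m m from by simp only [solLoop]]
  exact solLoop_eq_walk (m :: t) m ((m :: t).length + 1) hpair hge (by omega)

-- ===== VERDICT (by name: the statement is the Claim_ definition above) =====
theorem solution_spec : Claim_equal_solution := by
  intro A _ hpre
  unfold Spec_solution
  exact solution_eq_alt A hpre
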